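-- pv_equiv track=rewrite | github.com/981377660LMT/algorithm-study | 22_专题/灵茶八题/5-所有子数组异或的和.py | sumOfSubarrayXor
-- ===== SOURCE A (Python) =====
-- from itertools import accumulate
-- from typing import List
--
-- def sumOfSubarrayXor(nums: List[int]) -> int:
--     def solve(bit: int) -> int:
--         arr = [(v >> bit) & 1 for v in nums]
--         preXor = [0] + list(accumulate(arr, lambda x, y: x ^ y))
--         ones = preXor.count(1)
--         count = ones * (len(preXor) - ones)
--         return count * (1 << bit)
--
--     return sum(solve(i) for i in range(40))
-- ===== SOURCE B (Python) =====
-- def sumOfSubarrayXor(nums):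
--     # One forward pass over the integer prefix XOR; per bit, count previously
--     # seen prefixes with the opposite parity (the initial 0 prefix included).
--     ones = [0] * 40          # ones[b] = prefixes seen so far with bit b set
--     t = 1                    # prefixes seen so far (the initial 0 prefix)
--     p = 0
--     ans = 0
--     for v in nums:
--         p ^= v
--         bits = [(p >> b) & 1 for b in range(40)]
--         for b, (o, x) in enumerate(zip(ones, bits)):
--             ans += ((t - o) if x else o) << b
--         ones = [o + x for o, x in zip(ones, bits)]
--         t += 1
--     return ans
-- ===== Notes on version B (the rewrite author's own statement) =====
-- stated objective: alternative
-- what changed: A makes 40 per-bit passes, each building a 0/1 array, its prefix-XOR list and taking ones*(n+1-ones); B makes one forward pass over the integer prefix XOR, keeping per-bit counts of prefixes seen and adding, for each new prefix and bit, the number of earlier prefixes with opposite parity.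
import Mathlib
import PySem

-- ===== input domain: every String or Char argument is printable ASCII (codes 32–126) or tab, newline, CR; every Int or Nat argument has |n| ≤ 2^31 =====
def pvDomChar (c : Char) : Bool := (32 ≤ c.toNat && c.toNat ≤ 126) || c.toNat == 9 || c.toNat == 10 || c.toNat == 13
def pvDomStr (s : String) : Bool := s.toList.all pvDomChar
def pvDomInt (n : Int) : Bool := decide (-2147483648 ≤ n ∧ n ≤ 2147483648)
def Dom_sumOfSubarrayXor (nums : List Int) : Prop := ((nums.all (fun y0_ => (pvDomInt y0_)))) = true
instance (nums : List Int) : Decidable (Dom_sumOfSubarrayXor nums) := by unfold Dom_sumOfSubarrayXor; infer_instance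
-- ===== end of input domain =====

-- B replaces A's 40 per-bit passes (per-bit prefix array + ones*(n+1-ones) product) by ONE forward
-- pass over the integer prefix XOR that, per bit, adds the count of previously seen opposite-parity
-- prefixes (alternative decomposition, same asymptotic cost).

-- Python '(v >> b) & 1' (used by both sources); '>>' is Int's '>>>', '&' is PySem.Int.band
def pyBit (v : Int) (b : Nat) : Int := PySem.Int.band (v >>> b) 1

-- ===== PORT A =====
def sumOfSubarrayXor (nums : List Int) : Int :=
  let solve : Nat → Int := fun bit =>
    let arr := nums.map (fun v => pyBit v bit)
    -- [0] + list(accumulate(arr, xor)) = scanl xor 0 arr; '^' is PySem.Int.bxor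
    let preXor := List.scanl (fun x y => PySem.Int.bxor x y) 0 arr
    let ones : Int := (PySem.List.count preXor 1 : Int)
    let count := ones * ((preXor.length : Int) - ones)
    count * ((1 : Int) <<< bit)
  (List.range 40).foldl (fun acc i => acc + solve i) 0

-- ===== PORT B =====
-- loop body of Source B (state = (ones, t, p, ans)); the shift count b comes from enumerate,
-- so it is ≥ 0 and '.toNat' is exact for Python's '<< b'
def altStep (st : List Int × Int × Int × Int) (v : Int) : List Int × Int × Int × Int :=
  let p := PySem.Int.bxor st.2.2.1 v
  let bits := (List.range 40).map (fun b => pyBit p b)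
  let pairs := st.1.zip bits
  (pairs.map (fun ox => ox.1 + ox.2),
   st.2.1 + 1,
   p,
   (PySem.List.enumerate pairs).foldl
     (fun a (box : Int × (Int × Int)) =>
       a + (((if box.2.2 = (0:Int) then box.2.1 else st.2.1 - box.2.1) : Int) <<< box.1.toNat))
     st.2.2.2)

def sumOfSubarrayXor_alt (nums : List Int) : Int :=
  (nums.foldl altStep (List.replicate 40 0, 1, 0, 0)).2.2.2

-- ===== PRECONDITION & SPEC =====
def Spec_sumOfSubarrayXor (nums : List Int) (out : Int) : Prop := out = sumOfSubarrayXor_alt nums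
instance (nums : List Int) (out : Int) : Decidable (Spec_sumOfSubarrayXor nums out) := by unfold Spec_sumOfSubarrayXor; infer_instance

-- ===== CLAIM (what is proved, stated in full; the proofs are below) =====
def Claim_equal_sumOfSubarrayXor : Prop := ∀ (nums : List Int), Dom_sumOfSubarrayXor nums → Spec_sumOfSubarrayXor nums (sumOfSubarrayXor nums)

-- ===== LEMMAS AND PROOFS =====

-- bit b of v, as the Int 0/1 both ports compute
def bitI (b : Nat) (v : Int) : Int := if v.testBit b then 1 else 0

theorem testBit_zero_shiftRight (v : Int) (b : Nat) : (v >>> b).testBit 0 = v.testBit b := by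
  rcases v with m | m
  · show (Int.ofNat (m >>> b)).testBit 0 = _
    simp [Int.testBit]
  · show (Int.negSucc (m >>> b)).testBit 0 = _
    simp [Int.testBit]

theorem band_one_eq_testBit (a : Int) : PySem.Int.band a 1 = if a.testBit 0 then 1 else 0 := by
  unfold PySem.Int.band
  rcases a with m | m
  · simp [Int.testBit, Nat.and_one_is_mod, Nat.testBit_zero]
    rcases Nat.mod_two_eq_zero_or_one m with h | h <;> simp [h] <;> omega
  · simp [Int.testBit, Int.negSucc_eq, Nat.and_one_is_mod, Nat.testBit_zero]
    rcases Nat.mod_two_eq_zero_or_one m with h | h <;> simp [h] <;> omega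

theorem pybit_eq (v : Int) (b : Nat) : pyBit v b = bitI b v := by
  rw [pyBit, band_one_eq_testBit, testBit_zero_shiftRight, bitI]

theorem bxor_eq_xor (a b : Int) : PySem.Int.bxor a b = Int.xor a b := by
  unfold PySem.Int.bxor Int.xor
  rcases a with a | a <;> rcases b with b | b <;> simp [Int.negSucc_eq] <;> omega

theorem bitI_bxor (b : Nat) (x y : Int) :
    bitI b (PySem.Int.bxor x y) = PySem.Int.bxor (bitI b x) (bitI b y) := by
  rw [bxor_eq_xor]
  by_cases hx : x.testBit b <;> by_cases hy : y.testBit b <;>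
    simp [bitI, Int.testBit_lxor, hx, hy] <;> decide

-- ones of bit b among the prefixes p^x1, p^x1^x2, … (the prefixes strictly AFTER p)
def cntBit (b : Nat) : Int → List Int → Int
  | _, [] => 0
  | p, v :: xs => bitI b (PySem.Int.bxor p v) + cntBit b (PySem.Int.bxor p v) xs

theorem scanl_map_bit (b : Nat) (xs : List Int) (c : Int) :
    List.scanl (fun x y => PySem.Int.bxor x y) (bitI b c) (xs.map (fun v => bitI b v))
      = (List.scanl (fun x y => PySem.Int.bxor x y) c xs).map (bitI b) := by
  induction xs generalizing c with
  | nil => simp [List.scanl_nil]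
  | cons v xs ih => simp [List.scanl_cons, ← bitI_bxor, ih]

theorem count_one_scanl (b : Nat) (xs : List Int) (p : Int) :
    ((PySem.List.count ((List.scanl (fun x y => PySem.Int.bxor x y) p xs).map (bitI b)) 1 : Nat) : Int)
      = bitI b p + cntBit b p xs := by
  induction xs generalizing p with
  | nil =>
    by_cases h : p.testBit b <;>
      simp [List.scanl_nil, PySem.List.count, bitI, cntBit, h]
  | cons v xs ih =>
    have hih := ih (PySem.Int.bxor p v)
    rw [List.scanl_cons,
      show cntBit b p (v :: xs)
        = bitI b (PySem.Int.bxor p v) + cntBit b (PySem.Int.bxor p v) xs from rfl]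
    simp only [List.map_cons, PySem.List.count, List.count_cons] at hih ⊢
    push_cast at hih ⊢
    rw [hih]
    by_cases h : p.testBit b <;> simp [bitI, h] <;> ring

theorem enumerate_map_range' {α : Type} (h : Nat → α) (n : Nat) : ∀ (j : Nat),
    PySem.List.enumerate ((List.range' j n).map h) (j : Int)
      = (List.range' j n).map (fun (i : Nat) => ((i : Int), h i)) := by
  induction n with
  | zero => intro j; rfl
  | succ n ih =>
    intro j
    rw [List.range'_succ, List.map_cons, List.map_cons,
      show PySem.List.enumerate ((h j) :: (List.range' (j + 1) n).map h) (j : Int)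
        = ((j : Int), h j) :: PySem.List.enumerate ((List.range' (j + 1) n).map h) ((j : Int) + 1)
        from rfl]
    rw [show ((j : Int) + 1) = ((j + 1 : Nat) : Int) from by push_cast; ring, ih]

-- Python's enumerate(zip-of-maps-over-range), as port B's inner loop sees it
theorem enumerate_map_range {α : Type} (h : Nat → α) (n : Nat) :
    PySem.List.enumerate ((List.range n).map h)
      = (List.range n).map (fun (i : Nat) => ((i : Int), h i)) := by
  rw [List.range_eq_range']
  exact_mod_cast enumerate_map_range' h n 0

theorem A_char (nums : List Int) :
    sumOfSubarrayXor nums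
      = ((List.range 40).map (fun b =>
          (cntBit b 0 nums * (((nums.length : Int) + 1) - cntBit b 0 nums)) * 2 ^ b)).sum := by
  unfold sumOfSubarrayXor
  rw [PySem.List.foldl_add, zero_add]
  refine congrArg List.sum (List.map_congr_left fun b _ => ?_)
  simp only [pybit_eq]
  have h0 : (0 : Int) = bitI b 0 := by simp [bitI, Int.testBit]
  rw [h0, scanl_map_bit, show bitI b 0 = 0 from (h0).symm]
  rw [count_one_scanl]
  simp [bitI, Int.testBit, List.length_scanl, Int.shiftLeft_eq]

theorem B_loop (xs : List Int) : ∀ (o : Nat → Int) (t p ans : Int),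
    (List.foldl altStep ((List.range 40).map o, t, p, ans) xs).2.2.2
      = ans + ((List.range 40).map (fun b =>
          ((o b + cntBit b p xs) * ((t + (xs.length : Int)) - (o b + cntBit b p xs))
            - o b * (t - o b)) * 2 ^ b)).sum := by
  induction xs with
  | nil =>
    intro o t p ans
    simp only [List.foldl_nil, cntBit]
    rw [List.sum_eq_zero, add_zero]
    intro x hx
    simp only [List.mem_map] at hx
    obtain ⟨b, _, rfl⟩ := hx
    simp only [List.length_nil]
    push_cast
    ring
  | cons v xs ih =>
    intro o t p ans
    rw [List.foldl_cons]
    have hstep : altStep ((List.range 40).map o, t, p, ans) v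
        = ((List.range 40).map (fun b => o b + bitI b (PySem.Int.bxor p v)),
           t + 1, PySem.Int.bxor p v,
           ans + ((List.range 40).map (fun b =>
             (if bitI b (PySem.Int.bxor p v) = 0 then o b else t - o b) * 2 ^ b)).sum) := by
      unfold altStep
      simp only [pybit_eq, List.zip_map', enumerate_map_range, List.map_map, List.foldl_map]
      rw [PySem.List.foldl_add]
      simp [Int.shiftLeft_eq, ite_mul]
    rw [hstep, ih]
    rw [add_assoc, ← PySem.List.sum_map_add_int]
    refine congrArg (ans + ·) (congrArg List.sum (List.map_congr_left fun b _ => ?_))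
    rw [show cntBit b p (v :: xs)
          = bitI b (PySem.Int.bxor p v) + cntBit b (PySem.Int.bxor p v) xs from rfl]
    by_cases h : (PySem.Int.bxor p v).testBit b <;>
      · simp [bitI, h, List.length_cons, Nat.cast_add, Nat.cast_one]
        ring

-- ===== VERDICT (by name: the statement is the Claim_ definition above) =====
theorem sumOfSubarrayXor_spec : Claim_equal_sumOfSubarrayXor := by
  intro nums _
  show sumOfSubarrayXor nums = sumOfSubarrayXor_alt nums
  unfold sumOfSubarrayXor_alt
  rw [show (List.replicate 40 (0:Int)) = (List.range 40).map (fun _ => (0:Int)) from by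
        simp [List.map_const']]
  rw [B_loop, A_char, zero_add]
  refine congrArg List.sum (List.map_congr_left fun b _ => ?_)
  ring
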